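-- pv_equiv track=rewrite | github.com/Koudocko/REMS | weather/webserver/webserver/views.py | compute_aqi
-- ===== SOURCE A (Python) =====
-- def compute_aqi(tvoc, co2):
--     # Ranges for each value to correspond to a rating
--     levels = ['Low risk', 'Moderate risk', 'High risk', 'Very high risk', 'Severe risk', 'Hazardous risk']
--     tvoc_ranges = [100, 200, 300, 400, 500, float('inf')]
--     co2_ranges = [800, 1000, 1500, 2000, 2500, float('inf')]
--
--     vidx, cidx = 0, 0
--     for i, value in enumerate(tvoc_ranges):
--         if tvoc <= value:
--             vidx = i
--             break;
--     for j, value in enumerate(co2_ranges):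
--         if co2 <= value:
--             cidx = j
--             break;
--
--     return levels[max(cidx, vidx)]
-- ===== SOURCE B (Python) =====
-- def compute_aqi(tvoc, co2):
--     # Single pass over a zipped table: first row both values fit determines the label.
--     table = [
--         (100, 800, 'Low risk'),
--         (200, 1000, 'Moderate risk'),
--         (300, 1500, 'High risk'),
--         (400, 2000, 'Very high risk'),
--         (500, 2500, 'Severe risk'),
--     ]
--     for t, c, label in table:
--         if tvoc <= t and co2 <= c:
--             return label
--     return 'Hazardous risk'
-- ===== Notes on version B (the rewrite author's own statement) =====
-- stated objective: alternative
-- what changed: Instead of computing two bucket indices with separate break loops and taking their max into a label table, B makes a single pass over one zipped (tvoc-threshold, co2-threshold, label) table and returns the first label whose row both values satisfy; no indices, no max, no inf sentinels.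
import Mathlib
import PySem

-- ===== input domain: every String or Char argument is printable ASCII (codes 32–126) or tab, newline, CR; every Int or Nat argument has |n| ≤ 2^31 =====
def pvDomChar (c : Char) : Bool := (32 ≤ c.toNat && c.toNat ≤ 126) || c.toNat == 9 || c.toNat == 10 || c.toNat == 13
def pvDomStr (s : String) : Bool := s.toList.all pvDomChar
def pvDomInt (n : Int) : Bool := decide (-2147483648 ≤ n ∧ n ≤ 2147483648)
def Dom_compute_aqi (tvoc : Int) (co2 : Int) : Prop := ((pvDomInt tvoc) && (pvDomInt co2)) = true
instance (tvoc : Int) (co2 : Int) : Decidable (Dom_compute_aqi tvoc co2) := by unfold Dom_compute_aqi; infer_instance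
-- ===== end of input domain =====

-- B replaces A's two index-computing break loops + max over a label table by a single
-- pass over one zipped (tvoc-threshold, co2-threshold, label) table; objective: alternative.

-- ===== PORT A =====
-- A's loop scans the threshold list with an index and breaks at the first `value <= t`;
-- the final float('inf') entry always matches, which here is the empty-tail case
-- (reaching [] corresponds to `value <= inf`, so the accumulated index is returned).
def pvFirstLE (x : Int) : List Int → Nat → Nat
  | [], i => i
  | t :: rest, i => if x ≤ t then i else pvFirstLE x rest (i + 1)

def compute_aqi (tvoc : Int) (co2 : Int) : String :=
  let levels : List String := ["Low risk", "Moderate risk", "High risk", "Very high risk", "Severe risk", "Hazardous risk"]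
  let vidx := pvFirstLE tvoc [100, 200, 300, 400, 500] 0
  let cidx := pvFirstLE co2 [800, 1000, 1500, 2000, 2500] 0
  levels.getD (max cidx vidx) ""

-- ===== PORT B =====
-- B's for-loop with early return over the triple table, as structural recursion.
def pvScanTable (tvoc : Int) (co2 : Int) : List (Int × Int × String) → String
  | [] => "Hazardous risk"
  | (t, c, label) :: rest =>
      if tvoc ≤ t ∧ co2 ≤ c then label else pvScanTable tvoc co2 rest

def compute_aqi_alt (tvoc : Int) (co2 : Int) : String :=
  pvScanTable tvoc co2
    [(100, 800, "Low risk"), (200, 1000, "Moderate risk"), (300, 1500, "High risk"),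
     (400, 2000, "Very high risk"), (500, 2500, "Severe risk")]

-- ===== PRECONDITION & SPEC =====
def Spec_compute_aqi (tvoc : Int) (co2 : Int) (out : String) : Prop := out = compute_aqi_alt tvoc co2
instance (tvoc : Int) (co2 : Int) (out : String) : Decidable (Spec_compute_aqi tvoc co2 out) := by unfold Spec_compute_aqi; infer_instance

-- ===== CLAIM (what is proved, stated in full; the proofs are below) =====
def Claim_equal_compute_aqi : Prop := ∀ (tvoc : Int) (co2 : Int), Dom_compute_aqi tvoc co2 → Spec_compute_aqi tvoc co2 (compute_aqi tvoc co2)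

-- ===== LEMMAS AND PROOFS =====

-- ===== VERDICT (by name: the statement is the Claim_ definition above) =====
set_option maxHeartbeats 2000000 in
theorem compute_aqi_spec : Claim_equal_compute_aqi := by
  intro tvoc co2 _
  unfold Spec_compute_aqi compute_aqi compute_aqi_alt
  simp only [pvFirstLE, pvScanTable]
  split_ifs <;> first | rfl | omega
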